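-- pv_equiv track=rewrite | github.com/mmertama/advent-of-code-2020 | day24.py | get_tile_address
-- ===== SOURCE A (Python) =====
-- def get_tile_address(position, instruction):
--     direction = instruction[0]
--     new_position = (
--             position[0] + direction[0],
--             position[1] + direction[1],
--             position[2] + direction[2])
--     if len(instruction) == 1:
--         return new_position
--     return get_tile_address(new_position, instruction[1:])
-- ===== SOURCE B (Python) =====
-- def get_tile_address(position, instruction):
--     if not instruction:
--         return position
--     x = position[0]
--     y = position[1]
--     z = position[2]
--     for d in instruction:
--         x += d[0]
--         y += d[1]
--         z += d[2]
--     return (x, y, z)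
-- ===== Notes on version B (the rewrite author's own statement) =====
-- stated objective: simpler
-- what changed: Replaced list-slicing recursion with a single iterative loop accumulating the three coordinate sums; B returns position unchanged on an empty instruction list where A raises IndexError.
-- crash fix: On an empty instruction list A raises IndexError (instruction[0]); B returns position unchanged. — e.g. on get_tile_address((2, -3, 1), []): A raises IndexError, B returns (2, -3, 1)
import Mathlib
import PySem

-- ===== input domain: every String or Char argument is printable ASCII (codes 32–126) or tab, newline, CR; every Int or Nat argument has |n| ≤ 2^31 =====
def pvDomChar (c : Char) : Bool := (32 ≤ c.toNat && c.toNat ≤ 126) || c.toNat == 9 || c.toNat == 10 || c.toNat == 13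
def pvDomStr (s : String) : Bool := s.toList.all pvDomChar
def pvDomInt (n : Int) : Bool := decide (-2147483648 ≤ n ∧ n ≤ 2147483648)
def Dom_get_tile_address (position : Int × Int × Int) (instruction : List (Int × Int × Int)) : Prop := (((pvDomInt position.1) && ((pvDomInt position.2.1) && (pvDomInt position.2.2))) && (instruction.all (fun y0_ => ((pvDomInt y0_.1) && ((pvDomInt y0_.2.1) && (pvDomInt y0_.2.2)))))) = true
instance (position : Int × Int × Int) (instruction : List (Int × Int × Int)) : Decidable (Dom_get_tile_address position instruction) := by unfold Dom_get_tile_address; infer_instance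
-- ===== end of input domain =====

-- B replaces A's list-slicing recursion with one iterative accumulation loop (simpler, no slices);
-- equivalence is claimed on non-empty instruction lists (A raises IndexError on []).

-- ===== PORT A =====
-- literal transliteration of A's recursion: direction = instruction[0]; recurse on instruction[1:].
def get_tile_address (position : Int × Int × Int) (instruction : List (Int × Int × Int)) : Int × Int × Int :=
  match instruction with
  | [] => position  -- unreachable under Pre_ (Python raises IndexError here)
  | direction :: rest =>
    let new_position : Int × Int × Int :=
      (position.1 + direction.1, position.2.1 + direction.2.1, position.2.2 + direction.2.2)
    if rest = [] then new_position
    else get_tile_address new_position rest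

-- ===== PORT B =====
-- literal transliteration of Source B: empty check, then a fold accumulating (x, y, z).
def get_tile_address_alt (position : Int × Int × Int) (instruction : List (Int × Int × Int)) : Int × Int × Int :=
  if instruction = [] then position
  else
    let acc := instruction.foldl
      (fun (p : Int × Int × Int) d => (p.1 + d.1, p.2.1 + d.2.1, p.2.2 + d.2.2))
      (position.1, position.2.1, position.2.2)
    (acc.1, acc.2.1, acc.2.2)

-- ===== PRECONDITION & SPEC =====
-- Pre_ excludes the empty instruction list, on which Python A raises IndexError (instruction[0]).
def Pre_get_tile_address (position : Int × Int × Int) (instruction : List (Int × Int × Int)) : Prop :=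
  instruction ≠ []
instance (position : Int × Int × Int) (instruction : List (Int × Int × Int)) : Decidable (Pre_get_tile_address position instruction) := by unfold Pre_get_tile_address; infer_instance
def pvWitness_get_tile_address : (Int × Int × Int) × (List (Int × Int × Int)) :=
  ((0, 0, 0), [(1, -1, 0), (0, 1, -1)])

-- On an empty instruction list A raises IndexError (instruction[0]); B returns position unchanged.
def Raises_get_tile_address (position : Int × Int × Int) (instruction : List (Int × Int × Int)) : Prop :=
  instruction = []
instance (position : Int × Int × Int) (instruction : List (Int × Int × Int)) : Decidable (Raises_get_tile_address position instruction) := by unfold Raises_get_tile_address; infer_instance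
def pvRaiseWitness_get_tile_address : (Int × Int × Int) × (List (Int × Int × Int)) :=
  ((2, -3, 1), [])
def pvRaiseWitnessOut_get_tile_address : Int × Int × Int := (2, -3, 1)

def Spec_get_tile_address (position : Int × Int × Int) (instruction : List (Int × Int × Int)) (out : Int × Int × Int) : Prop := out = get_tile_address_alt position instruction
instance (position : Int × Int × Int) (instruction : List (Int × Int × Int)) (out : Int × Int × Int) : Decidable (Spec_get_tile_address position instruction out) := by unfold Spec_get_tile_address; infer_instance

-- ===== CLAIM (what is proved, stated in full; the proofs are below) =====
def Claim_equal_get_tile_address : Prop := ∀ (position : Int × Int × Int) (instruction : List (Int × Int × Int)), Dom_get_tile_address position instruction → Pre_get_tile_address position instruction → Spec_get_tile_address position instruction (get_tile_address position instruction)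
def Claim_raises_get_tile_address : Prop := (∀ (position : Int × Int × Int) (instruction : List (Int × Int × Int)), Dom_get_tile_address position instruction → Raises_get_tile_address position instruction → ¬ Pre_get_tile_address position instruction) ∧ (Dom_get_tile_address (pvRaiseWitness_get_tile_address.1) (pvRaiseWitness_get_tile_address.2) ∧ Raises_get_tile_address (pvRaiseWitness_get_tile_address.1) (pvRaiseWitness_get_tile_address.2) ∧ get_tile_address_alt (pvRaiseWitness_get_tile_address.1) (pvRaiseWitness_get_tile_address.2) = pvRaiseWitnessOut_get_tile_address)

-- ===== LEMMAS AND PROOFS =====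
theorem get_tile_address_eq_foldl (instruction : List (Int × Int × Int)) :
    ∀ (position : Int × Int × Int), instruction ≠ [] →
    get_tile_address position instruction =
      instruction.foldl (fun (p : Int × Int × Int) d => (p.1 + d.1, p.2.1 + d.2.1, p.2.2 + d.2.2)) position := by
  induction instruction with
  | nil => intro _ h; exact absurd rfl h
  | cons d rest ih =>
    intro position _
    simp only [get_tile_address, List.foldl_cons]
    by_cases hr : rest = []
    · subst hr; simp
    · simp only [if_neg hr]
      exact ih _ hr

-- ===== VERDICT (by name: the statement is the Claim_ definition above) =====
theorem get_tile_address_spec : Claim_equal_get_tile_address := by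
  intro position instruction _ hpre
  unfold Spec_get_tile_address get_tile_address_alt
  rw [if_neg hpre, get_tile_address_eq_foldl instruction position hpre]

@[simp] theorem get_tile_address_raises : Claim_raises_get_tile_address := by
  unfold Claim_raises_get_tile_address
  exact ⟨fun _ _ _ h hp => hp h, by decide⟩
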